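-- pv_equiv track=rewrite | github.com/purvajpatel/hackuta | app/lib/truncate_chisel.py | compress_hpp_file
-- ===== SOURCE A (Python) =====
-- def compress_hpp_file(content: str) -> str:
--     lines = content.split('\n')
--     result = []
--     i = 0
--
--     while i < len(lines):
--         line = lines[i]
--         stripped = line.strip()
--
--         # Keep empty lines and preprocessor directives
--         if not stripped or stripped.startswith('#'):
--             result.append(line)
--             i += 1
--             continue
--
--         # Keep comments
--         if stripped.startswith('//') or stripped.startswith('/*'):
--             result.append(line)
--             i += 1
--             continue
--
--         # Check if this looks like a function definition (has opening brace)
--         # We look for lines that end with { or have { after )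
--         if '{' in line:
--             # If it's just a brace (namespace, class, struct, etc.), keep it
--             if stripped == '{' or stripped.startswith('namespace') or \
--                stripped.startswith('class') or stripped.startswith('struct') or \
--                stripped.startswith('enum') or stripped.startswith('union'):
--                 result.append(line)
--                 i += 1
--                 continue
--
--             # This is likely a function definition - skip until closing brace
--             brace_count = line.count('{') - line.count('}')
--             i += 1
--
--             # Skip lines until we balance the braces
--             while i < len(lines) and brace_count > 0:
--                 brace_count += lines[i].count('{') - lines[i].count('}')
--                 i += 1
--             continue
--
--         # Otherwise, keep the line (prototypes, variable declarations, etc.)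
--         result.append(line)
--         i += 1
--
--     return '\n'.join(result)
-- ===== SOURCE B (Python) =====
-- def compress_hpp_file(content: str) -> str:
--     result = []
--     skip_depth = 0
--     for line in content.split('\n'):
--         if skip_depth > 0:
--             skip_depth = max(0, skip_depth + line.count('{') - line.count('}'))
--             continue
--         stripped = line.strip()
--         if (not stripped or stripped.startswith('#')
--                 or stripped.startswith('//') or stripped.startswith('/*')
--                 or '{' not in line
--                 or stripped == '{'
--                 or stripped.startswith(('namespace', 'class', 'struct', 'enum', 'union'))):
--             result.append(line)
--         else:
--             skip_depth = max(0, line.count('{') - line.count('}'))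
--     return '\n'.join(result)
-- ===== Notes on version B (the rewrite author's own statement) =====
-- stated objective: simpler
-- what changed: Replaced A's index-driven outer while loop with a nested inner brace-skipping while loop by a single flat for-loop over the lines that maintains a skip_depth counter and one flat keep/skip classification.
import Mathlib
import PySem

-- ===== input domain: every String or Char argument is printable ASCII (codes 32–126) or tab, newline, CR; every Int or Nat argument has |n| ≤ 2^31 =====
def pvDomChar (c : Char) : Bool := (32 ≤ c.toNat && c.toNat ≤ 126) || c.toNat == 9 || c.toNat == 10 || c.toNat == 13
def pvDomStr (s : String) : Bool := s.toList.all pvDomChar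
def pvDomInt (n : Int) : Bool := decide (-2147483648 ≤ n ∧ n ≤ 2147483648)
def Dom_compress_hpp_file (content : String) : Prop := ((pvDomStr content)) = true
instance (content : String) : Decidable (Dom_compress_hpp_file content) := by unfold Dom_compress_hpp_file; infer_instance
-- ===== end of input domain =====

-- B replaces A's nested index-driven while loops by one flat pass holding a skip_depth counter; objective: simpler.

-- ===== PORT A =====
-- line.count('{') - line.count('}')
def pvCnt (line : String) : Int :=
  (PySem.Str.count line "{" : Int) - (PySem.Str.count line "}" : Int)

-- A's inner 'while i < len(lines) and brace_count > 0' loop: returns the remaining lines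
def pvA_skip : List String → Int → List String
  | [], _ => []
  | l :: t, bc => if bc > 0 then pvA_skip t (bc + pvCnt l) else l :: t

theorem pvA_skip_length (ls : List String) (bc : Int) :
    (pvA_skip ls bc).length ≤ ls.length := by
  induction ls generalizing bc with
  | nil => simp [pvA_skip]
  | cons l t ih =>
    simp only [pvA_skip]
    split
    · exact Nat.le_succ_of_le (ih _)
    · exact Nat.le_refl _

-- A's outer 'while i < len(lines)' loop over the remaining lines
def pvA_loop : List String → List String
  | [] => []
  | l :: t =>
    let s := PySem.Str.strip l
    if s = "" ∨ PySem.Str.startswith s "#" = true then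
      l :: pvA_loop t
    else if PySem.Str.startswith s "//" = true ∨ PySem.Str.startswith s "/*" = true then
      l :: pvA_loop t
    else if PySem.Str.isIn "{" l = true then
      if s = "{" ∨ PySem.Str.startswith s "namespace" = true ∨
         PySem.Str.startswith s "class" = true ∨ PySem.Str.startswith s "struct" = true ∨
         PySem.Str.startswith s "enum" = true ∨ PySem.Str.startswith s "union" = true then
        l :: pvA_loop t
      else
        pvA_loop (pvA_skip t (pvCnt l))
    else
      l :: pvA_loop t
termination_by ls => ls.length
decreasing_by
  all_goals simp only [List.length_cons]
  all_goals first
    | exact Nat.lt_succ_self _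
    | exact Nat.lt_succ_of_le (pvA_skip_length t (pvCnt l))

-- content.split('\n') with the non-empty literal separator: split? is some here, so getD is exact
def compress_hpp_file (content : String) : String :=
  PySem.Str.join "\n" (pvA_loop ((PySem.Str.split? content "\n").getD []))

-- ===== PORT B =====
-- B's keep test: one flat disjunction
def pvB_keep (line s : String) : Bool :=
  decide (s = "") || PySem.Str.startswith s "#" || PySem.Str.startswith s "//" ||
  PySem.Str.startswith s "/*" || !(PySem.Str.isIn "{" line) || decide (s = "{") ||
  PySem.Str.startswith s "namespace" || PySem.Str.startswith s "class" ||
  PySem.Str.startswith s "struct" || PySem.Str.startswith s "enum" ||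
  PySem.Str.startswith s "union"

-- B's single for-loop with the skip_depth accumulator
def pvB_loop : List String → Int → List String
  | [], _ => []
  | l :: t, skip =>
    if skip > 0 then
      pvB_loop t (max 0 (skip + pvCnt l))
    else if pvB_keep l (PySem.Str.strip l) then
      l :: pvB_loop t 0
    else
      pvB_loop t (max 0 (pvCnt l))

def compress_hpp_file_alt (content : String) : String :=
  PySem.Str.join "\n" (pvB_loop ((PySem.Str.split? content "\n").getD []) 0)

-- ===== PRECONDITION & SPEC =====
def Spec_compress_hpp_file (content : String) (out : String) : Prop := out = compress_hpp_file_alt content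
instance (content : String) (out : String) : Decidable (Spec_compress_hpp_file content out) := by unfold Spec_compress_hpp_file; infer_instance

-- ===== CLAIM (what is proved, stated in full; the proofs are below) =====
def Claim_equal_compress_hpp_file : Prop := ∀ (content : String), Dom_compress_hpp_file content → Spec_compress_hpp_file content (compress_hpp_file content)

-- ===== LEMMAS AND PROOFS =====

theorem pvA_skip_nonpos (ls : List String) (bc : Int) (h : ¬ bc > 0) :
    pvA_skip ls bc = ls := by
  cases ls with
  | nil => rfl
  | cons l t => simp [pvA_skip, h]

-- B with a clamped skip counter equals A resuming after A's inner skip loop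
theorem pvB_eq_pvA_skip (n : ℕ) :
    ∀ (ls : List String), ls.length ≤ n → ∀ (bc : Int),
      pvB_loop ls (max 0 bc) = pvA_loop (pvA_skip ls bc) := by
  induction n with
  | zero =>
    intro ls hls bc
    have : ls = [] := List.length_eq_zero_iff.mp (Nat.le_zero.mp hls)
    subst this
    simp [pvB_loop, pvA_skip, pvA_loop]
  | succ n ih =>
    intro ls hls bc
    match ls with
    | [] => simp [pvB_loop, pvA_skip, pvA_loop]
    | l :: t =>
      have ht : t.length ≤ n := Nat.lt_succ_iff.mp hls
      by_cases hbc : bc > 0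
      · rw [(by omega : max 0 bc = bc)]
        simp only [pvB_loop, pvA_skip, if_pos hbc]
        exact ih t ht (bc + pvCnt l)
      · rw [(by omega : max 0 bc = 0), pvA_skip_nonpos _ _ hbc]
        rw [pvB_loop, pvA_loop]
        rw [if_neg (by omega : ¬ ((0 : Int) > 0))]
        have hkeep : pvB_loop t 0 = pvA_loop t := by
          have := ih t ht 0
          rwa [(by omega : max (0:Int) 0 = 0), pvA_skip_nonpos _ _ (by omega)] at this
        have hskip : pvB_loop t (max 0 (pvCnt l)) = pvA_loop (pvA_skip t (pvCnt l)) :=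
          ih t ht (pvCnt l)
        rw [hkeep, hskip]
        unfold pvB_keep
        split_ifs <;> simp_all

-- ===== VERDICT (by name: the statement is the Claim_ definition above) =====
theorem compress_hpp_file_spec : Claim_equal_compress_hpp_file := by
  intro content _
  unfold Spec_compress_hpp_file compress_hpp_file compress_hpp_file_alt
  congr 1
  have h := pvB_eq_pvA_skip ((PySem.Str.split? content "\n").getD []).length
    ((PySem.Str.split? content "\n").getD []) (Nat.le_refl _) 0
  rw [(by omega : max (0:Int) 0 = 0), pvA_skip_nonpos _ _ (by omega)] at h
  exact h.symm
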